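-- pv_equiv track=rewrite | github.com/jonasrenault/advent | advent/advent2018/day10.py | has_vertical_line
-- ===== SOURCE A (Python) =====
-- def has_vertical_line(points: set[tuple[int, int]]) -> bool:
--     for x, y in points:
--         for dy in range(1, 6):
--             if (x, y + dy) not in points:
--                 break
--         else:
--             break
--     else:
--         return False
--     return True
-- ===== SOURCE B (Python) =====
-- def has_vertical_line(points):
--     cols = {}
--     for x, y in points:
--         cols.setdefault(x, set()).add(y)
--     for ys in cols.values():
--         s = sorted(ys)
--         for a, b in zip(s, s[5:]):
--             if b - a == 5:
--                 return True
--     return False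
-- ===== Notes on version B (the rewrite author's own statement) =====
-- stated objective: alternative
-- what changed: Replaces A's per-point fixed-offset membership probing by grouping the points into a dict x -> set of y's, sorting each column once, and scanning the sorted column with zip(s, s[5:]) for a pair at distance 5 (which, on distinct sorted ints, is exactly a run of 6 consecutive values).
import Mathlib
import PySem

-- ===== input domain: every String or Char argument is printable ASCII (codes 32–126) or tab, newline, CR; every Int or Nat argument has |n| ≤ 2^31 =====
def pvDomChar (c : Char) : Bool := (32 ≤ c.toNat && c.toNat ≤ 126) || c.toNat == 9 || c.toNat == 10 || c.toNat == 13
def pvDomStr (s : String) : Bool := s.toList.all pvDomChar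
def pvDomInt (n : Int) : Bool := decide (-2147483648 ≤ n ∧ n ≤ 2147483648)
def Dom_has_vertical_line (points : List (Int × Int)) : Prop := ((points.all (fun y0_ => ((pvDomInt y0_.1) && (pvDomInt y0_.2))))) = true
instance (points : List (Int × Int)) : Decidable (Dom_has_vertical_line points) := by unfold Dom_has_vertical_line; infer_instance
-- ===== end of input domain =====

-- B groups the points into a dict x -> set of y's and scans each sorted column for a pair
-- at distance 5 five positions apart (a run of 6 consecutive y's); same return value as A.

-- ===== PORT A =====
-- A: for each point, probe membership of the 5 points directly above it (for/else loops).
def has_vertical_line (points : List (Int × Int)) : Bool :=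
  points.any (fun p =>
    (PySem.List.pyRange 1 6 1).all (fun dy => points.contains (p.1, p.2 + dy)))

-- ===== PORT B =====
-- cols.setdefault(x, set()).add(y): in-place add on the defaulted entry = insert of the updated set
def hvlCols (points : List (Int × Int)) : PySem.Dict Int (PySem.Set Int) :=
  points.foldl
    (fun d p => d.insert p.1 (PySem.Set.add (d.getD p.1 PySem.Set.empty) p.2))
    PySem.Dict.empty

def hvlColHas (ys : PySem.Set Int) : Bool :=
  let s := PySem.List.sorted ys (fun y => y) false
  (s.zip (PySem.List.slice s (some 5) none)).any (fun ab => ab.2 - ab.1 == 5)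

def has_vertical_line_alt (points : List (Int × Int)) : Bool :=
  (PySem.Dict.values (hvlCols points)).any hvlColHas

-- ===== PRECONDITION & SPEC =====
def Spec_has_vertical_line (points : List (Int × Int)) (out : Bool) : Prop := out = has_vertical_line_alt points
instance (points : List (Int × Int)) (out : Bool) : Decidable (Spec_has_vertical_line points out) := by unfold Spec_has_vertical_line; infer_instance

-- ===== CLAIM (what is proved, stated in full; the proofs are below) =====
def Claim_equal_has_vertical_line : Prop := ∀ (points : List (Int × Int)), Dom_has_vertical_line points → Spec_has_vertical_line points (has_vertical_line points)

-- ===== LEMMAS AND PROOFS =====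

-- the Prop both programs decide: some point has the 5 points above it present
def VP (points : List (Int × Int)) : Prop :=
  ∃ x y, (x, y) ∈ points ∧ (x, y + 1) ∈ points ∧ (x, y + 2) ∈ points ∧
    (x, y + 3) ∈ points ∧ (x, y + 4) ∈ points ∧ (x, y + 5) ∈ points

-- the y's of column x, in order of appearance
def colys (x : Int) (l : List (Int × Int)) : List Int :=
  l.filterMap (fun p => if p.1 = x then some p.2 else none)

theorem mem_colys (x y : Int) (l : List (Int × Int)) : y ∈ colys x l ↔ (x, y) ∈ l := by
  simp only [colys, List.mem_filterMap]
  constructor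
  · rintro ⟨⟨a, b⟩, hm, hif⟩
    by_cases h : a = x
    · simp [h] at hif; subst h; subst hif; exact hm
    · simp [h] at hif
  · intro h; exact ⟨(x, y), h, by simp⟩

theorem cols_getD (l : List (Int × Int)) :
    ∀ (d : PySem.Dict Int (PySem.Set Int)) (x : Int),
      (l.foldl (fun d p => d.insert p.1 (PySem.Set.add (d.getD p.1 PySem.Set.empty) p.2)) d).getD x PySem.Set.empty
        = PySem.Set.update (d.getD x PySem.Set.empty) (colys x l) := by
  induction l with
  | nil => intro d x; rfl
  | cons p t ih =>
    intro d x
    simp only [List.foldl_cons, ih, colys, List.filterMap_cons]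
    by_cases hx : p.1 = x
    · subst hx
      simp only [PySem.Dict.getD_insert]
      simp [PySem.Set.update]
    · simp only [if_neg hx, PySem.Dict.getD_insert]
      rw [if_neg (fun h => hx h.symm)]

theorem getD_hvlCols (points : List (Int × Int)) (x : Int) :
    (hvlCols points).getD x PySem.Set.empty = PySem.Set.ofList (colys x points) := by
  rw [hvlCols, cols_getD]
  rfl

theorem keys_hvlCols (points : List (Int × Int)) :
    (hvlCols points).keys = PySem.Set.ofList (points.map (·.1)) := by
  rw [hvlCols, PySem.Dict.keys_foldl_insert_key]
  rfl

-- strictly increasing list of ints: index gap is a value gap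
theorem gap_lemma (s : List Int) (hp : s.Pairwise (· < ·)) :
    ∀ (k i : Nat) (h : i + k < s.length), s[i]'(by omega) + (k : Int) ≤ s[i + k]'h := by
  intro k
  induction k with
  | zero => intro i h; simp
  | succ k ih =>
    intro i h
    have h1 : i + k < s.length := by omega
    have h2 := ih i h1
    have h3 : s[i + k]'h1 < s[i + k + 1]'(by omega) :=
      List.pairwise_iff_getElem.mp hp (i + k) (i + k + 1) h1 (by omega) (by omega)
    have h4 : s[i + (k + 1)]'h = s[i + k + 1]'(by omega) := rfl
    push_cast
    omega

theorem gap_lemma' (s : List Int) (hp : s.Pairwise (· < ·)) (i j : Nat)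
    (hij : i ≤ j) (hj : j < s.length) :
    s[i]'(by omega) + ((j - i : Nat) : Int) ≤ s[j]'hj := by
  have := gap_lemma s hp (j - i) i (by omega)
  simpa only [Nat.add_sub_cancel' hij] using this

theorem mono_idx (s : List Int) (hp : s.Pairwise (· < ·)) (a b : Nat)
    (ha : a < s.length) (hb : b < s.length) (h : s[a]'ha < s[b]'hb) : a < b := by
  by_contra hc
  have hba : b ≤ a := by omega
  have := gap_lemma' s hp b a hba ha
  omega

theorem run_iff (ys : List Int) :
    hvlColHas (PySem.Set.ofList ys) = true ↔
      ∃ y, y ∈ ys ∧ (y + 1) ∈ ys ∧ (y + 2) ∈ ys ∧ (y + 3) ∈ ys ∧ (y + 4) ∈ ys ∧ (y + 5) ∈ ys := by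
  have hp : (PySem.List.sorted (PySem.Set.ofList ys) (fun y => y) false).Pairwise (· < ·) :=
    PySem.List.sorted_ofList_pairwise_lt ys
  set s := PySem.List.sorted (PySem.Set.ofList ys) (fun y => y) false with hs
  have hmem : ∀ z : Int, z ∈ s ↔ z ∈ ys := by
    intro z; rw [hs, PySem.List.mem_sorted, PySem.Set.mem_ofList]
  have hslice : PySem.List.slice s (some 5) none = s.drop 5 := by
    have := PySem.List.slice_from_natCast s 5
    simpa using this
  rw [hvlColHas]
  simp only [← hs, hslice, List.any_eq_true]
  constructor
  · rintro ⟨ab, hab, hbeq⟩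
    obtain ⟨i, hi, habeq⟩ := List.mem_iff_getElem.mp hab
    rw [List.length_zip, List.length_drop] at hi
    have hi5 : i + 5 < s.length := by omega
    rw [List.getElem_zip, List.getElem_drop] at habeq
    have hd : s[5 + i]'(by omega) - s[i]'(by omega) = 5 := by
      have : (ab.2 - ab.1 == (5 : Int)) = true := hbeq
      rw [← habeq] at this
      simpa using this
    have key : ∀ d : Nat, d ≤ 5 → s[i]'(by omega) + (d : Int) ∈ ys := by
      intro d hd5
      have g1 := gap_lemma s hp d i (by omega)
      have g2 := gap_lemma' s hp (i + d) (i + 5) (by omega) (by omega)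
      have hcast : ((i + 5 - (i + d) : Nat) : Int) = 5 - (d : Int) := by omega
      rw [hcast] at g2
      have h55 : s[i + 5]'(by omega) = s[5 + i]'(by omega) := by
        congr 1; omega
      have heq : s[i + d]'(by omega) = s[i]'(by omega) + (d : Int) := by
        rw [h55] at g2; omega
      rw [← heq]
      exact (hmem _).mp (List.getElem_mem _)
    refine ⟨s[i]'(by omega), ?_, ?_, ?_, ?_, ?_, ?_⟩
    · rw [← hmem]; exact List.getElem_mem _
    · simpa using key 1 (by omega)
    · simpa using key 2 (by omega)
    · simpa using key 3 (by omega)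
    · simpa using key 4 (by omega)
    · simpa using key 5 (by omega)
  · rintro ⟨y, h0, h1, h2, h3, h4, h5⟩
    obtain ⟨i0, hl0, he0⟩ := List.mem_iff_getElem.mp ((hmem y).mpr h0)
    obtain ⟨i1, hl1, he1⟩ := List.mem_iff_getElem.mp ((hmem _).mpr h1)
    obtain ⟨i2, hl2, he2⟩ := List.mem_iff_getElem.mp ((hmem _).mpr h2)
    obtain ⟨i3, hl3, he3⟩ := List.mem_iff_getElem.mp ((hmem _).mpr h3)
    obtain ⟨i4, hl4, he4⟩ := List.mem_iff_getElem.mp ((hmem _).mpr h4)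
    obtain ⟨i5, hl5, he5⟩ := List.mem_iff_getElem.mp ((hmem _).mpr h5)
    have m01 : i0 < i1 := mono_idx s hp i0 i1 hl0 hl1 (by rw [he0, he1]; omega)
    have m12 : i1 < i2 := mono_idx s hp i1 i2 hl1 hl2 (by rw [he1, he2]; omega)
    have m23 : i2 < i3 := mono_idx s hp i2 i3 hl2 hl3 (by rw [he2, he3]; omega)
    have m34 : i3 < i4 := mono_idx s hp i3 i4 hl3 hl4 (by rw [he3, he4]; omega)
    have m45 : i4 < i5 := mono_idx s hp i4 i5 hl4 hl5 (by rw [he4, he5]; omega)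
    have hi05 : i0 + 5 < s.length := by omega
    have g1 := gap_lemma s hp 5 i0 hi05
    have g2 := gap_lemma' s hp (i0 + 5) i5 (by omega) hl5
    have heq : s[i0 + 5]'hi05 = y + 5 := by
      rw [he5] at g2; rw [he0] at g1
      have : ((i5 - (i0 + 5) : Nat) : Int) ≥ 0 := by positivity
      omega
    refine ⟨(s[i0]'hl0, (s.drop 5)[i0]'(by rw [List.length_drop]; omega)), ?_, ?_⟩
    · rw [List.mem_iff_getElem]
      refine ⟨i0, by rw [List.length_zip, List.length_drop]; omega, ?_⟩
      rw [List.getElem_zip]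
    · rw [List.getElem_drop]
      simp only [beq_iff_eq]
      have h55 : s[5 + i0]'(by omega) = s[i0 + 5]'hi05 := by congr 1; omega
      rw [h55, heq, he0]
      ring

theorem B_iff (points : List (Int × Int)) : has_vertical_line_alt points = true ↔ VP points := by
  have hnd : (hvlCols points).keys.Nodup := by
    rw [keys_hvlCols]; exact PySem.Set.nodup_ofList _
  rw [has_vertical_line_alt, PySem.Dict.values_eq_map_keys _ hnd PySem.Set.empty,
    List.any_map, List.any_eq_true]
  constructor
  · rintro ⟨x, hxk, hcol⟩
    simp only [Function.comp] at hcol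
    rw [getD_hvlCols] at hcol
    obtain ⟨y, h0, h1, h2, h3, h4, h5⟩ := (run_iff _).mp hcol
    exact ⟨x, y, (mem_colys x y points).mp h0, (mem_colys x _ points).mp h1,
      (mem_colys x _ points).mp h2, (mem_colys x _ points).mp h3,
      (mem_colys x _ points).mp h4, (mem_colys x _ points).mp h5⟩
  · rintro ⟨x, y, h0, h1, h2, h3, h4, h5⟩
    refine ⟨x, ?_, ?_⟩
    · rw [keys_hvlCols, PySem.Set.mem_ofList]
      exact List.mem_map.mpr ⟨(x, y), h0, rfl⟩
    · simp only [Function.comp]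
      rw [getD_hvlCols]
      exact (run_iff _).mpr ⟨y, (mem_colys x y points).mpr h0, (mem_colys x _ points).mpr h1,
        (mem_colys x _ points).mpr h2, (mem_colys x _ points).mpr h3,
        (mem_colys x _ points).mpr h4, (mem_colys x _ points).mpr h5⟩

theorem A_iff (points : List (Int × Int)) : has_vertical_line points = true ↔ VP points := by
  have hr : PySem.List.pyRange 1 6 1 = [1, 2, 3, 4, 5] := by decide
  rw [has_vertical_line, hr]
  simp only [List.any_eq_true, List.all_eq_true, List.mem_cons, List.not_mem_nil, or_false,
    List.contains_iff_mem, VP]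
  constructor
  · rintro ⟨⟨x, y⟩, hm, hall⟩
    exact ⟨x, y, hm, hall 1 (by simp), hall 2 (by simp), hall 3 (by simp),
      hall 4 (by simp), hall 5 (by simp)⟩
  · rintro ⟨x, y, h0, h1, h2, h3, h4, h5⟩
    refine ⟨(x, y), h0, ?_⟩
    intro dy hdy
    rcases hdy with h | h | h | h | h <;> subst h <;> assumption

-- ===== VERDICT (by name: the statement is the Claim_ definition above) =====
theorem has_vertical_line_spec : Claim_equal_has_vertical_line := by
  intro points _
  unfold Spec_has_vertical_line
  exact Bool.eq_iff_iff.mpr ((A_iff points).trans (B_iff points).symm)
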